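-- pv_equiv track=rewrite | github.com/dpack78/tossUpGame | DaveFinal.py | getWinningByAlot
-- ===== SOURCE A (Python) =====
-- def getWinningByAlot(a_score,myScore):
--     greatestScoreDiff = 0
--     for player, score in a_score.items():
--         scoreDiff = myScore - score
--         if(scoreDiff > greatestScoreDiff):
--             greatestScoreDiff = scoreDiff
--     if(greatestScoreDiff > 57):
--         return True
--     return False
-- ===== SOURCE B (Python) =====
-- def getWinningByAlot(a_score, myScore):
--     # Divide and conquer: does any opponent trail me by more than 57?
--     def trails(items):
--         if not items:
--             return False
--         if len(items) == 1:
--             return myScore - items[0][1] > 57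
--         mid = len(items) // 2
--         return trails(items[:mid]) or trails(items[mid:])
--     return trails(list(a_score.items()))
-- ===== Notes on version B (the rewrite author's own statement) =====
-- stated objective: alternative
-- what changed: Replaces the running clamped max-of-differences accumulator with a divide-and-conquer existence test: the item list is split in half recursively and the halves are combined with a short-circuiting 'or', testing each single difference against 57 directly instead of maintaining a running maximum over a linear scan.
import Mathlib
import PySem

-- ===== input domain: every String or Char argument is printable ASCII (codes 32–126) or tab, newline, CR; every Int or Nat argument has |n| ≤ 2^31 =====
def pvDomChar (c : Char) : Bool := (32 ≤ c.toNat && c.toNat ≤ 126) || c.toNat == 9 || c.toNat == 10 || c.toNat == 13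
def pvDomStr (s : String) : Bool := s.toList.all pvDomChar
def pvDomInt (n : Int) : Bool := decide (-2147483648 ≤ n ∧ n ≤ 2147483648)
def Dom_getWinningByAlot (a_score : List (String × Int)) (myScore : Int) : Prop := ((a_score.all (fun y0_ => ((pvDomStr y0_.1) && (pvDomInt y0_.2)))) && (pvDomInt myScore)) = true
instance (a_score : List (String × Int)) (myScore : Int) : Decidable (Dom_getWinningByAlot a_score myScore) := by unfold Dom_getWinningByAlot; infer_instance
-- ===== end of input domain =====

-- B replaces A's running clamped max-of-differences accumulator with a
-- divide-and-conquer short-circuiting existence test (objective: alternative).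

-- ===== PORT A =====
def getWinningByAlot (a_score : List (String × Int)) (myScore : Int) : Bool :=
  let greatestScoreDiff :=
    a_score.foldl (fun g p =>
      let scoreDiff := myScore - p.2
      if scoreDiff > g then scoreDiff else g) 0
  if greatestScoreDiff > 57 then true else false

-- ===== PORT B =====
-- def trails(items): empty -> False; singleton -> its diff > 57;
-- else split at len//2 and combine the halves with a short-circuiting 'or'.
def pvTrails (myScore : Int) : List (String × Int) → Bool
  | [] => false
  | [p] => decide (myScore - p.2 > 57)
  | a :: b :: t =>
    let mid := (a :: b :: t).length / 2
    pvTrails myScore ((a :: b :: t).take mid) || pvTrails myScore ((a :: b :: t).drop mid)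
termination_by items => items.length
decreasing_by
  · simp [List.length_take]; omega
  · simp [List.length_drop]; omega

def getWinningByAlot_alt (a_score : List (String × Int)) (myScore : Int) : Bool :=
  pvTrails myScore a_score

-- ===== PRECONDITION & SPEC =====
def Spec_getWinningByAlot (a_score : List (String × Int)) (myScore : Int) (out : Bool) : Prop := out = getWinningByAlot_alt a_score myScore
instance (a_score : List (String × Int)) (myScore : Int) (out : Bool) : Decidable (Spec_getWinningByAlot a_score myScore out) := by unfold Spec_getWinningByAlot; infer_instance

-- ===== CLAIM =====
def Claim_equal_getWinningByAlot : Prop := ∀ (a_score : List (String × Int)) (myScore : Int), Dom_getWinningByAlot a_score myScore → Spec_getWinningByAlot a_score myScore (getWinningByAlot a_score myScore)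

-- ===== LEMMAS AND PROOFS =====

-- A's running max exceeds 57 iff the start value does or some player's difference does.
theorem foldA_gt_iff (myScore : Int) (l : List (String × Int)) (init : Int) :
    (57 < l.foldl (fun g p => if myScore - p.2 > g then myScore - p.2 else g) init)
    ↔ (57 < init ∨ ∃ p ∈ l, 57 < myScore - p.2) := by
  induction l generalizing init with
  | nil => simp
  | cons hd tl ih =>
    simp only [List.foldl_cons, ih, List.mem_cons]
    constructor
    · rintro (h | ⟨p, hp, hgt⟩)
      · by_cases hc : myScore - hd.2 > init
        · simp only [if_pos hc] at h
          exact Or.inr ⟨hd, Or.inl rfl, h⟩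
        · simp only [if_neg hc] at h
          exact Or.inl h
      · exact Or.inr ⟨p, Or.inr hp, hgt⟩
    · rintro (h | ⟨p, (rfl | hp), hgt⟩)
      · left; split <;> omega
      · left; split <;> omega
      · exact Or.inr ⟨p, hp, hgt⟩

-- B's divide-and-conquer search is the same existence test.
theorem pvTrails_iff (myScore : Int) (l : List (String × Int)) :
    pvTrails myScore l = true ↔ ∃ p ∈ l, 57 < myScore - p.2 := by
  fun_induction pvTrails myScore l with
  | case1 => simp
  | case2 p => simp
  | case3 a b t mid ih1 ih2 =>
    simp only [Bool.or_eq_true, ih1, ih2]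
    constructor
    · rintro (⟨p, hp, h⟩ | ⟨p, hp, h⟩)
      · exact ⟨p, List.mem_of_mem_take hp, h⟩
      · exact ⟨p, List.mem_of_mem_drop hp, h⟩
    · rintro ⟨p, hp, h⟩
      rw [← List.take_append_drop mid (a :: b :: t), List.mem_append] at hp
      rcases hp with hp | hp
      · exact Or.inl ⟨p, hp, h⟩
      · exact Or.inr ⟨p, hp, h⟩

-- ===== VERDICT =====
theorem getWinningByAlot_spec : Claim_equal_getWinningByAlot := by
  intro a_score myScore _
  unfold Spec_getWinningByAlot getWinningByAlot getWinningByAlot_alt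
  simp only
  have hA := foldA_gt_iff myScore a_score 0
  have hB := pvTrails_iff myScore a_score
  split
  · rename_i h
    rw [gt_iff_lt, hA] at h
    symm; rw [hB]
    rcases h with h | h
    · omega
    · exact h
  · rename_i h
    rw [gt_iff_lt, hA] at h
    push Not at h
    symm
    rcases hp : pvTrails myScore a_score with _ | _
    · rfl
    · exact absurd (hB.mp hp) (by push Not; exact h.2)
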